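-- pv_equiv track=rewrite | github.com/pediapress/mwlib | src/mwlib/writers/rl/writer.py | _len
-- ===== SOURCE A (Python) =====
-- def _len(txt):
--     in_tag = False
--     length = 0
--     for char in txt:
--         if char == "<":
--             in_tag = True
--         elif char == ">":
--             in_tag = False
--         elif not in_tag:
--             length += 1
--     return length
-- ===== SOURCE B (Python) =====
-- def _len(txt):
--     segs = txt.split('<')
--     total = len(segs[0]) - segs[0].count('>')
--     for seg in segs[1:]:
--         i = seg.find('>')
--         if i != -1:
--             rest = seg[i + 1:]
--             total += len(rest) - rest.count('>')
--     return total
-- ===== Notes on version B (the rewrite author's own statement) =====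
-- stated objective: faster
-- what changed: Replaced the per-character in_tag state machine by splitting the text on the tag-open character and, for each subsequent segment, discarding the leading tag body up to and including its first tag-close character before counting the remainder minus its embedded close characters; in CPython the scanning moves into C-level str.split/find/count calls.
import Mathlib
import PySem

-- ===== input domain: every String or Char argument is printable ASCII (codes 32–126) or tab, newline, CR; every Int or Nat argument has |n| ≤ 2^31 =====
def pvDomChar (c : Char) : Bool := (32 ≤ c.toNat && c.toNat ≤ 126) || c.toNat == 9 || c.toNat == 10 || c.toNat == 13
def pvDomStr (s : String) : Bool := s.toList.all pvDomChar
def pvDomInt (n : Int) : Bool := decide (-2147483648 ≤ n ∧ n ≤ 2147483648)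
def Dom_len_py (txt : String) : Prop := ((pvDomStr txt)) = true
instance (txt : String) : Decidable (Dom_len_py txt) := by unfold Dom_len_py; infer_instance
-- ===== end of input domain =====

-- B replaces A's per-character in_tag state machine by splitting on the tag-open character and
-- skipping each segment's leading tag body up to its first tag-close character (same O(n), but
-- measurably faster in CPython: the scanning is done by C-level str methods).

-- ===== PORT A =====
-- literal transliteration of A's per-character loop with state (in_tag, length)
def len_py (txt : String) : Int :=
  (txt.toList.foldl
    (fun (st : Bool × Int) (char : Char) =>
      if char = '<' then (true, st.2)
      else if char = '>' then (false, st.2)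
      else if st.1 = false then (st.1, st.2 + 1)
      else st)
    (false, 0)).2

-- ===== PORT B =====
-- per-segment body of Source B's loop: skip up to and including the first '>', count the rest
-- minus its '>' characters
def lenAltStep (total : Int) (seg : List Char) : Int :=
  let i := PySem.Chars.find seg ['>']
  if i ≠ -1 then
    let rest := PySem.List.slice seg (some (i + 1)) none
    total + ((rest.length : Int) - (PySem.Chars.count rest ['>'] : Int))
  else total

def len_py_alt (txt : String) : Int :=
  match PySem.Chars.splitOn txt.toList ['<'] with
  | [] => 0  -- unreachable: str.split never returns an empty list
  | s0 :: rest =>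
    rest.foldl lenAltStep ((s0.length : Int) - (PySem.Chars.count s0 ['>'] : Int))

-- ===== PRECONDITION & SPEC =====
def Spec_len_py (txt : String) (out : Int) : Prop := out = len_py_alt txt
instance (txt : String) (out : Int) : Decidable (Spec_len_py txt out) := by unfold Spec_len_py; infer_instance

-- ===== CLAIM (what is proved, stated in full; the proofs are below) =====
def Claim_equal_len_py : Prop := ∀ (txt : String), Dom_len_py txt → Spec_len_py txt (len_py txt)

-- ===== LEMMAS AND PROOFS =====

-- reference recursion for A: value added by the loop from state b on the remaining chars
def fRef (b : Bool) : List Char → Int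
  | [] => 0
  | c :: t =>
    if c = '<' then fRef true t
    else if c = '>' then fRef false t
    else (if b then 0 else 1) + fRef b t

-- structural model of txt.split('<') (cur = current piece, reversed)
def mySplit (cur : List Char) : List Char → List (List Char)
  | [] => [cur.reverse]
  | c :: t => if c = '<' then cur.reverse :: mySplit [] t else mySplit (c :: cur) t

-- chars outside, per Source B's per-segment formula
def outside (h : List Char) : Int := (h.length : Int) - (h.count '>' : Int)

-- per-segment spec of lenAltStep
def gSpec : List Char → Int
  | [] => 0
  | c :: t => if c = '>' then outside t else gSpec t

def sumg (segs : List (List Char)) : Int := (segs.map gSpec).sum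

def outAll : List (List Char) → Int
  | [] => 0
  | h :: tl => outside h + sumg tl

lemma foldA (cs : List Char) : ∀ (b : Bool) (n : Int),
    (cs.foldl
      (fun (st : Bool × Int) (char : Char) =>
        if char = '<' then (true, st.2)
        else if char = '>' then (false, st.2)
        else if st.1 = false then (st.1, st.2 + 1)
        else st)
      (b, n)).2 = n + fRef b cs := by
  induction cs with
  | nil => intro b n; simp [fRef]
  | cons c t ih =>
    intro b n
    by_cases h1 : c = '<'
    · simp [List.foldl, h1, fRef, ih]
    · by_cases h2 : c = '>'
      · simp [List.foldl, h1, h2, fRef, ih]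
      · cases b <;> simp [List.foldl, h1, h2, fRef, ih] <;> ring

lemma countGo (l : List Char) : ∀ (fuel : Nat) (acc : Nat), l.length ≤ fuel →
    PySem.Chars.count.go ['>'] fuel l acc = acc + l.count '>' := by
  induction l with
  | nil => intro fuel acc _; cases fuel <;> simp [PySem.Chars.count.go]
  | cons c t ih =>
    intro fuel acc h
    cases fuel with
    | zero => simp at h
    | succ m =>
      by_cases hc : c = '>'
      · simp [PySem.Chars.count.go, hc, ih m (acc + 1) (by simpa using h), List.count_cons]
        omega
      · simp [PySem.Chars.count.go, List.isPrefixOf, hc, ih m acc (by simpa using h), List.count_cons, Ne.symm hc]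

lemma countEq (l : List Char) : PySem.Chars.count l ['>'] = l.count '>' := by
  simp [PySem.Chars.count, countGo l l.length 0 le_rfl]

lemma findGo (t : List Char) : ∀ (k : Nat),
    PySem.Chars.find.go ['>'] t k = if '>' ∈ t then ((k + t.idxOf '>' : Nat) : Int) else -1 := by
  induction t with
  | nil => intro k; simp [PySem.Chars.find.go]
  | cons c t ih =>
    intro k
    by_cases hc : c = '>'
    · simp [PySem.Chars.find.go, hc, List.isPrefixOf]
    · rw [show PySem.Chars.find.go ['>'] (c :: t) k = PySem.Chars.find.go ['>'] t (k + 1) by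
        simp [PySem.Chars.find.go, List.isPrefixOf, hc, Ne.symm hc]]
      rw [ih (k + 1)]
      by_cases hm : '>' ∈ t
      · simp [hm, hc, List.idxOf_cons, Ne.symm hc]
        push_cast; ring
      · simp [hm, hc, Ne.symm hc]

lemma findEq (t : List Char) :
    PySem.Chars.find t ['>'] = if '>' ∈ t then ((t.idxOf '>' : Nat) : Int) else -1 := by
  simpa using findGo t 0

lemma gSpecZero (t : List Char) (hm : '>' ∉ t) : gSpec t = 0 := by
  induction t with
  | nil => simp [gSpec]
  | cons c t ih =>
    simp at hm
    simp [gSpec, Ne.symm hm.1, ih hm.2]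

lemma gStepEq (seg : List Char) : ∀ (total : Int), lenAltStep total seg = total + gSpec seg := by
  induction seg with
  | nil => intro total; simp [lenAltStep, findEq, gSpec]
  | cons c t ih =>
    intro total
    by_cases hc : c = '>'
    · simp [lenAltStep, findEq, hc, gSpec, PySem.List.slice_from_one, countEq, outside]
    · by_cases hm : '>' ∈ t
      · have e1 : PySem.Chars.find (c :: t) ['>'] = ((t.idxOf '>' + 1 : Nat) : Int) := by
          simp [findEq, hc, hm, List.idxOf_cons, Ne.symm hc]
        have e2 : PySem.Chars.find t ['>'] = ((t.idxOf '>' : Nat) : Int) := by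
          simp [findEq, hm]
        have hne1 : ((t.idxOf '>' + 1 : Nat) : Int) ≠ -1 := by push_cast; omega
        have hne2 : ((t.idxOf '>' : Nat) : Int) ≠ -1 := by push_cast; omega
        rw [show gSpec (c :: t) = gSpec t by simp [gSpec, hc]]
        rw [lenAltStep, e1, if_pos hne1,
            show ((t.idxOf '>' + 1 : Nat) : Int) + 1 = ((t.idxOf '>' + 2 : Nat) : Int) by push_cast; ring,
            PySem.List.slice_from_natCast]
        rw [← ih total, lenAltStep, e2, if_pos hne2,
            show ((t.idxOf '>' : Nat) : Int) + 1 = ((t.idxOf '>' + 1 : Nat) : Int) by push_cast; ring,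
            PySem.List.slice_from_natCast]
        simp [List.drop]
      · simp [lenAltStep, findEq, hc, hm, List.idxOf_cons, Ne.symm hc, gSpecZero t hm,
          show gSpec (c :: t) = gSpec t by simp [gSpec, hc], gSpecZero t hm]

lemma splitGo (s : List Char) : ∀ (fuel : Nat) (cur : List Char) (accs : List (List Char)),
    s.length < fuel →
    PySem.Chars.splitOn.go ['<'] fuel s cur accs = accs.reverse ++ mySplit cur s := by
  induction s with
  | nil =>
    intro fuel cur accs h
    cases fuel with
    | zero => omega
    | succ m => simp [PySem.Chars.splitOn.go, mySplit]
  | cons c t ih =>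
    intro fuel cur accs h
    cases fuel with
    | zero => simp at h
    | succ m =>
      by_cases hc : c = '<'
      · rw [show PySem.Chars.splitOn.go ['<'] (m+1) (c::t) cur accs
            = PySem.Chars.splitOn.go ['<'] m t [] (cur.reverse :: accs) by
            simp [PySem.Chars.splitOn.go, List.isPrefixOf, hc]]
        rw [ih m [] (cur.reverse :: accs) (by simp at h; omega)]
        simp [mySplit, hc]
      · rw [show PySem.Chars.splitOn.go ['<'] (m+1) (c::t) cur accs
            = PySem.Chars.splitOn.go ['<'] m t (c :: cur) accs by
            simp [PySem.Chars.splitOn.go, List.isPrefixOf, hc, Ne.symm hc]]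
        rw [ih m (c :: cur) accs (by simp at h; omega)]
        simp [mySplit, hc]

lemma splitEq (s : List Char) : PySem.Chars.splitOn s ['<'] = mySplit [] s := by
  simpa using splitGo s (s.length + 1) [] [] (by omega)

lemma mySplitShape (s : List Char) : ∀ (cur : List Char),
    ∃ h tl, mySplit cur s = (cur.reverse ++ h) :: tl ∧ mySplit [] s = h :: tl := by
  induction s with
  | nil => intro cur; exact ⟨[], [], by simp [mySplit], by simp [mySplit]⟩
  | cons c t ih =>
    intro cur
    by_cases hc : c = '<'
    · obtain ⟨h, tl, h1, h2⟩ := ih []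
      exact ⟨[], mySplit [] t, by simp [mySplit, hc], by simp [mySplit, hc]⟩
    · obtain ⟨h, tl, h1, h2⟩ := ih (c :: cur)
      obtain ⟨h', tl', h1', h2'⟩ := ih [c]
      rw [h2'] at h2
      injection h2 with e1 e2
      subst e1; subst e2
      refine ⟨c :: h', tl', ?_, ?_⟩
      · simp [mySplit, hc]; simpa using h1
      · simp [mySplit, hc]; simpa using h1'

lemma mainClaims (s : List Char) :
    fRef false s = outAll (mySplit [] s) ∧ fRef true s = sumg (mySplit [] s) := by
  induction s with
  | nil => simp [fRef, mySplit, outAll, outside, sumg, gSpec]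
  | cons c t ih =>
    obtain ⟨ih1, ih2⟩ := ih
    obtain ⟨h, tl, hsh, hnil⟩ := mySplitShape t [c]
    by_cases hc : c = '<'
    · constructor
      · simp [fRef, hc, mySplit, outAll, outside, ih2, sumg]
      · simp [fRef, hc, mySplit, sumg, gSpec, ih2]
    · by_cases hg : c = '>'
      · constructor
        · rw [show fRef false (c :: t) = fRef false t by simp [fRef, hc, hg]]
          rw [show mySplit [] (c :: t) = (c :: h) :: tl by simp [mySplit, hc]; simpa using hsh]
          rw [ih1, hnil]
          simp [outAll, outside, hg, List.count_cons]
        · rw [show fRef true (c :: t) = fRef false t by simp [fRef, hc, hg]]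
          rw [show mySplit [] (c :: t) = (c :: h) :: tl by simp [mySplit, hc]; simpa using hsh]
          rw [ih1, hnil]
          simp [sumg, gSpec, hg, outAll]
      · constructor
        · rw [show fRef false (c :: t) = 1 + fRef false t by simp [fRef, hc, hg]]
          rw [show mySplit [] (c :: t) = (c :: h) :: tl by simp [mySplit, hc]; simpa using hsh]
          rw [ih1, hnil]
          simp [outAll, outside, hg, List.count_cons, Ne.symm hg]
          push_cast; ring
        · rw [show fRef true (c :: t) = fRef true t by simp [fRef, hc, hg]]
          rw [show mySplit [] (c :: t) = (c :: h) :: tl by simp [mySplit, hc]; simpa using hsh]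
          rw [ih2, hnil]
          simp [sumg, gSpec, hg]

lemma foldB (segs : List (List Char)) : ∀ (init : Int),
    segs.foldl lenAltStep init = init + sumg segs := by
  induction segs with
  | nil => intro init; simp [sumg]
  | cons h tl ih => intro init; simp [List.foldl, gStepEq, ih, sumg]; ring

-- ===== VERDICT (by name: the statement is the Claim_ definition above) =====
theorem len_py_spec : Claim_equal_len_py := by
  intro txt _
  unfold Spec_len_py len_py len_py_alt
  rw [foldA, splitEq]
  obtain ⟨h, tl, _, hnil⟩ := mySplitShape txt.toList []
  rw [hnil, (mainClaims txt.toList).1, hnil]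
  simp [foldB, outAll, countEq, outside]
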